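-- pv_equiv track=rewrite | github.com/CasoMateo/Algorithms4Fun | Leetcode/1184. Distance Between Bus Stops/solution.py | distanceBetweenBusStops
-- ===== SOURCE A (Python) =====
-- from typing import List
--
-- def distanceBetweenBusStops(distance: List[int], start: int, destination: int) -> int:
--
--   if start > destination:
--     start, destination = destination, start
--
--   rem1 = 0
--   for i in range(start, destination):
--     rem1 += distance[i]
--
--   rem2 = 0
--   for j in range(destination, len(distance) + start):
--     rem2 += distance[j % len(distance)]
--
--   return min(rem1, rem2)
-- ===== SOURCE B (Python) =====
-- def distanceBetweenBusStops(distance, start, destination):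
--     n = len(distance)
--     lo, hi = (start, destination) if start <= destination else (destination, start)
--     inside = 0
--     outside = 0
--     for k, w in enumerate(distance):
--         if (k - lo) % n < hi - lo:   # stop k lies on the circular window [lo, hi)
--             inside += w
--         else:
--             outside += w
--     return min(inside, outside)
-- ===== Notes on version B (the rewrite author's own statement) =====
-- stated objective: simpler
-- what changed: B makes a single pass over the stops, classifying each index by circular window membership ((k - lo) % n < hi - lo) into inside/outside accumulators, replacing A's two directional range loops (the second with modular element indexing).
-- outside the precondition, e.g. on distanceBetweenBusStops([-3, -1, 4], -2, 2): A returns -1, B returns 0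
import Mathlib
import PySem

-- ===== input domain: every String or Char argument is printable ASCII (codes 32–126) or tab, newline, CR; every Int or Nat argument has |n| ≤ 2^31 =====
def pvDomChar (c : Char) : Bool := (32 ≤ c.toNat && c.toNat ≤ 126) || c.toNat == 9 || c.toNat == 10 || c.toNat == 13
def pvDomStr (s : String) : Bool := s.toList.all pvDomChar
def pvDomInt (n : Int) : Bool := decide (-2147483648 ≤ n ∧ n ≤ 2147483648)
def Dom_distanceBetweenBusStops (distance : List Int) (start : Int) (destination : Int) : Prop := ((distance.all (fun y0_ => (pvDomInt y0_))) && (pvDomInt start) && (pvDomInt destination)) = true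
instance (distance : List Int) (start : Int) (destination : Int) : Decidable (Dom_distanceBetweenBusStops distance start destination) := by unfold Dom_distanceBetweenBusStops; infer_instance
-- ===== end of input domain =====

-- B replaces A's two directional range loops (the second with modular element indexing) by a
-- single pass over the stops, classifying each index by circular window membership into
-- inside/outside accumulators; objective: simpler.

-- ===== PORT A =====
def distanceBetweenBusStops (distance : List Int) (start : Int) (destination : Int) : Int :=
  let sd := if start > destination then (destination, start) else (start, destination)
  let s := sd.1
  let d := sd.2
  let rem1 := (PySem.List.pyRange s d 1).foldl (fun acc i => acc + PySem.List.pyGetD distance i 0) 0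
  let rem2 := (PySem.List.pyRange d ((distance.length : Int) + s) 1).foldl
      (fun acc j => acc + PySem.List.pyGetD distance (PySem.Int.mod j (distance.length : Int)) 0) 0
  min rem1 rem2

-- ===== PORT B =====
-- the 'for k, w in enumerate(distance)' loop of Source B, carrying (inside, outside)
def pvBLoop (n lo hi : Int) : List Int → Int → Int × Int → Int × Int
  | [], _, acc => acc
  | w :: t, k, acc =>
      pvBLoop n lo hi t (k + 1)
        (if PySem.Int.mod (k - lo) n < hi - lo then (acc.1 + w, acc.2) else (acc.1, acc.2 + w))

def distanceBetweenBusStops_alt (distance : List Int) (start : Int) (destination : Int) : Int :=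
  let n : Int := (distance.length : Int)
  let lohi := if start ≤ destination then (start, destination) else (destination, start)
  let p := pvBLoop n lohi.1 lohi.2 distance 0 (0, 0)
  min p.1 p.2

-- ===== PRECONDITION & SPEC =====
-- Pre_ keeps the inputs on which A's value is the circular-route answer: equal stops anywhere,
-- or a nonempty route with both stops within ±len and their span at most the route length; it
-- excludes out-of-range stops (A raises IndexError, or ZeroDivisionError on the empty route) and
-- spans longer than the route, where A's first loop counts the overlap stops twice — an artefact.
def Pre_distanceBetweenBusStops (distance : List Int) (start : Int) (destination : Int) : Prop :=
  start = destination ∨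
    (0 < (distance.length : Int) ∧
      -(distance.length : Int) ≤ min start destination ∧
      max start destination ≤ (distance.length : Int) ∧
      max start destination - min start destination ≤ (distance.length : Int))
instance (distance : List Int) (start : Int) (destination : Int) : Decidable (Pre_distanceBetweenBusStops distance start destination) := by unfold Pre_distanceBetweenBusStops; infer_instance

def pvWitness_distanceBetweenBusStops : List Int × Int × Int := ([4, 2, 7], 0, 2)

def Spec_distanceBetweenBusStops (distance : List Int) (start : Int) (destination : Int) (out : Int) : Prop := out = distanceBetweenBusStops_alt distance start destination
instance (distance : List Int) (start : Int) (destination : Int) (out : Int) : Decidable (Spec_distanceBetweenBusStops distance start destination out) := by unfold Spec_distanceBetweenBusStops; infer_instance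

-- ===== CLAIM (what is proved, stated in full; the proofs are below) =====
def Claim_equal_distanceBetweenBusStops : Prop := ∀ (distance : List Int) (start : Int) (destination : Int), Dom_distanceBetweenBusStops distance start destination → Pre_distanceBetweenBusStops distance start destination → Spec_distanceBetweenBusStops distance start destination (distanceBetweenBusStops distance start destination)

-- ===== LEMMAS AND PROOFS =====

lemma sum_take_sub (xs : List Int) (a b : Nat) (hab : a ≤ b) :
    ((xs.drop a).take (b - a)).sum = (xs.take b).sum - (xs.take a).sum := by
  have h : xs.take b = xs.take a ++ (xs.drop a).take (b - a) := by
    rw [← List.take_add]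
    congr 1
    omega
  rw [h, List.sum_append]
  ring

lemma sum_drop_eq (xs : List Int) (a : Nat) :
    (xs.drop a).sum = xs.sum - (xs.take a).sum := by
  have h : (xs.take a).sum + (xs.drop a).sum = xs.sum := by
    rw [← List.sum_append, List.take_append_drop]
  omega

lemma sum_take_drop (xs : List Int) (a b : Nat) (hab : a ≤ b) :
    ((xs.take b).drop a).sum = (xs.take b).sum - (xs.take a).sum := by
  rw [sum_drop_eq (xs.take b) a, List.take_take, Nat.min_eq_left hab]

-- map of pyGetD over an in-bounds range is the slice
lemma map_pyGetD_range_slice (xs : List Int) (a b : Int) (ha : 0 ≤ a) (hab : a ≤ b)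
    (hb : b ≤ xs.length) :
    (PySem.List.pyRange a b 1).map (fun i => PySem.List.pyGetD xs i 0)
      = PySem.List.slice xs (some a) (some b) := by
  have hb0 : 0 ≤ b := le_trans ha hab
  have hsplit := PySem.List.pyRange_one_append a b (xs.length : Int) hab hb
  have hA := PySem.List.map_pyGetD_pyRange' xs (0:Int) ha
  have hB := PySem.List.map_pyGetD_pyRange' xs (0:Int) hb0
  rw [hsplit, List.map_append, hB] at hA
  have hdrop : (xs.drop a.toNat).drop (b.toNat - a.toNat) = xs.drop b.toNat := by
    rw [List.drop_drop]
    congr 1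
    omega
  have hsp : (xs.drop a.toNat).take (b.toNat - a.toNat) ++ xs.drop b.toNat = xs.drop a.toNat := by
    conv_rhs => rw [← List.take_append_drop (b.toNat - a.toNat) (xs.drop a.toNat)]
    rw [hdrop]
  rw [PySem.List.slice_toNat xs ha hb0]
  exact List.append_cancel_right (hA.trans hsp.symm)

-- a Python index valid for xs denotes the same element as its remainder mod len
lemma pyGetD_eq_mod (xs : List Int) (i : Int) (hn : 0 < (xs.length : Int))
    (hlo : -(xs.length : Int) ≤ i) (hhi : i < (xs.length : Int)) :
    PySem.List.pyGetD xs i 0 = PySem.List.pyGetD xs (PySem.Int.mod i (xs.length : Int)) 0 := by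
  by_cases h0 : 0 ≤ i
  · rw [PySem.Int.mod_eq_emod_of_pos hn, Int.emod_eq_of_lt h0 hhi]
  · have hmod : PySem.Int.mod i (xs.length : Int) = i + (xs.length : Int) := by
      rw [PySem.Int.mod_eq_emod_of_pos hn]
      have : i % (xs.length : Int) = (i + (xs.length : Int)) % (xs.length : Int) := by
        conv_rhs => rw [show i + (xs.length : Int) = i + (xs.length : Int) * 1 by ring,
          Int.add_mul_emod_self_left]
      rw [this, Int.emod_eq_of_lt (by omega) (by omega)]
    have hk : i = -(((-i).toNat : Nat) : Int) := by omega
    rw [hmod]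
    rw [hk, PySem.List.pyGetD_neg_natCast xs (-i).toNat 0 (by omega) (by omega)]
    rw [PySem.List.pyGetD_eq_getElem xs 0 (by omega) (by omega)]
    congr 1
    omega

-- the wrapped modular sum of a window of length L ≤ len, in slice form
lemma arc_sum (xs : List Int) (a L : Int) (hn : 0 < (xs.length : Int))
    (hL0 : 0 ≤ L) (hLn : L ≤ (xs.length : Int)) :
    ((PySem.List.pyRange a (a + L) 1).map
        (fun i => PySem.List.pyGetD xs (PySem.Int.mod i (xs.length : Int)) 0)).sum
      = (PySem.List.slice xs (some (PySem.Int.mod a (xs.length : Int)))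
            (some (PySem.Int.mod a (xs.length : Int) + L))).sum
        + (xs.take (PySem.Int.mod a (xs.length : Int) + L - (xs.length : Int)).toNat).sum := by
  have hnz : (xs.length : Int) ≠ 0 := by omega
  set n : Int := (xs.length : Int) with hndef
  set a0 : Int := PySem.Int.mod a n with ha0def
  have ha0 : 0 ≤ a0 ∧ a0 < n := by
    rw [ha0def, PySem.Int.mod_eq_emod_of_pos hn]
    exact ⟨Int.emod_nonneg a hnz, Int.emod_lt_of_pos a hn⟩
  have hshift : (PySem.List.pyRange a (a + L) 1).map
      (fun i => PySem.List.pyGetD xs (PySem.Int.mod i n) 0)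
      = (List.range L.toNat).map
          (fun k : Nat => PySem.List.pyGetD xs (PySem.Int.mod (a0 + (k : Int)) n) 0) := by
    rw [PySem.List.pyRange_one a (a + L)]
    simp only [add_sub_cancel_left, List.map_map]
    apply List.map_congr_left
    intro k _
    simp only [Function.comp]
    congr 1
    have hq := PySem.Int.floordiv_mul_add_mod a n
    have hrw : a + (k : Int) = (a0 + (k : Int)) + n * PySem.Int.floordiv a n := by
      rw [ha0def]; linarith [hq]
    rw [hrw, PySem.Int.mod_eq_emod_of_pos hn, PySem.Int.mod_eq_emod_of_pos hn,
      Int.add_mul_emod_self_left]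
  rw [hshift]
  by_cases hcase : a0 + L ≤ n
  · have hcg : (List.range L.toNat).map
        (fun k : Nat => PySem.List.pyGetD xs (PySem.Int.mod (a0 + (k : Int)) n) 0)
        = (PySem.List.pyRange a0 (a0 + L) 1).map (fun i => PySem.List.pyGetD xs i 0) := by
      rw [PySem.List.pyRange_one a0 (a0 + L)]
      simp only [add_sub_cancel_left, List.map_map]
      apply List.map_congr_left
      intro k hk
      rw [List.mem_range] at hk
      simp only [Function.comp]
      congr 1
      rw [PySem.Int.mod_eq_emod_of_pos hn, Int.emod_eq_of_lt (by omega) (by omega)]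
    rw [hcg, map_pyGetD_range_slice xs a0 (a0 + L) ha0.1 (by omega) (by omega)]
    have : (a0 + L - n).toNat = 0 := by omega
    rw [this]
    simp
  · have hsplitN : L.toNat = (n - a0).toNat + (a0 + L - n).toNat := by omega
    rw [hsplitN, List.range_add, List.map_append, List.sum_append]
    have hpart1 : (List.range (n - a0).toNat).map
        (fun k : Nat => PySem.List.pyGetD xs (PySem.Int.mod (a0 + (k : Int)) n) 0)
        = (PySem.List.pyRange a0 n 1).map (fun i => PySem.List.pyGetD xs i 0) := by
      rw [PySem.List.pyRange_one a0 n, List.map_map]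
      apply List.map_congr_left
      intro k hk
      rw [List.mem_range] at hk
      simp only [Function.comp]
      congr 1
      rw [PySem.Int.mod_eq_emod_of_pos hn, Int.emod_eq_of_lt (by omega) (by omega)]
    have hpart2 : ((List.range (a0 + L - n).toNat).map (fun k : Nat => (n - a0).toNat + k)).map
        (fun k : Nat => PySem.List.pyGetD xs (PySem.Int.mod (a0 + (k : Int)) n) 0)
        = (PySem.List.pyRange 0 (a0 + L - n) 1).map (fun i => PySem.List.pyGetD xs i 0) := by
      rw [PySem.List.pyRange_one 0 (a0 + L - n), List.map_map, List.map_map]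
      simp only [sub_zero]
      apply List.map_congr_left
      intro k hk
      rw [List.mem_range] at hk
      simp only [Function.comp]
      congr 1
      have hidx : a0 + (((n - a0).toNat + k : Nat) : Int) = (k : Int) + n * 1 := by
        push_cast; omega
      rw [hidx, PySem.Int.mod_eq_emod_of_pos hn, Int.add_mul_emod_self_left,
        Int.emod_eq_of_lt (by omega) (by omega)]
      omega
    rw [hpart1, hpart2,
      map_pyGetD_range_slice xs 0 (a0 + L - n) le_rfl (by omega) (by omega)]
    have hfull : (PySem.List.pyRange a0 n 1).map (fun i => PySem.List.pyGetD xs i 0)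
        = xs.drop a0.toNat := PySem.List.map_pyGetD_pyRange' xs (0:Int) ha0.1
    rw [hfull, PySem.List.slice_toNat xs le_rfl (by omega),
      PySem.List.slice_toNat xs ha0.1 (by omega)]
    have hclamp : (xs.drop a0.toNat).take ((a0 + L).toNat - a0.toNat) = xs.drop a0.toNat := by
      apply List.take_of_length_le
      simp only [List.length_drop]
      omega
    rw [hclamp]
    simp only [Int.toNat_zero, List.drop_zero, Nat.sub_zero]

-- A's second loop over a full window of length n sums the whole route
lemma rem2_full (xs : List Int) (d : Int) (hn : 0 < (xs.length : Int)) :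
    (PySem.List.pyRange d ((xs.length : Int) + d) 1).foldl
        (fun acc j => acc + PySem.List.pyGetD xs (PySem.Int.mod j (xs.length : Int)) 0) 0
      = xs.sum := by
  have hnz : (xs.length : Int) ≠ 0 := by omega
  rw [PySem.List.foldl_add]
  have hdrw : (xs.length : Int) + d = d + (xs.length : Int) := by ring
  rw [hdrw, arc_sum xs d (xs.length : Int) hn (by omega) (by omega)]
  set d0 : Int := PySem.Int.mod d (xs.length : Int) with hd0def
  have hd0 : 0 ≤ d0 ∧ d0 < (xs.length : Int) := by
    rw [hd0def, PySem.Int.mod_eq_emod_of_pos hn]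
    exact ⟨Int.emod_nonneg d hnz, Int.emod_lt_of_pos d hn⟩
  rw [PySem.List.slice_toNat xs hd0.1 (by omega)]
  have hclamp : (xs.drop d0.toNat).take ((d0 + (xs.length : Int)).toNat - d0.toNat)
      = xs.drop d0.toNat := by
    apply List.take_of_length_le
    simp only [List.length_drop]
    omega
  have ht : (d0 + (xs.length : Int) - (xs.length : Int)).toNat = d0.toNat := by omega
  rw [hclamp, ht, sum_drop_eq]
  ring

-- B's inside-window sum, in recursion form (proof-only helper)
def inSum (n lo hi : Int) : List Int → Int → Int
  | [], _ => 0
  | w :: t, k => (if PySem.Int.mod (k - lo) n < hi - lo then w else 0) + inSum n lo hi t (k + 1)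

-- B's loop computes (inside sum, complement sum)
lemma pvBLoop_eq (n lo hi : Int) (xs : List Int) : ∀ (k a b : Int),
    pvBLoop n lo hi xs k (a, b)
      = (a + inSum n lo hi xs k, b + (xs.sum - inSum n lo hi xs k)) := by
  induction xs with
  | nil => intro k a b; simp [pvBLoop, inSum]
  | cons w t ih =>
    intro k a b
    rw [pvBLoop, inSum]
    by_cases hc : PySem.Int.mod (k - lo) n < hi - lo
    · rw [if_pos hc, if_pos hc, ih (k + 1) (a + w) b]
      simp only [List.sum_cons, Prod.mk.injEq]
      constructor <;> ring
    · rw [if_neg hc, if_neg hc, ih (k + 1) a (b + w)]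
      simp only [List.sum_cons, Prod.mk.injEq]
      constructor <;> ring

-- an empty window selects nothing
lemma inSum_zero (n lo hi : Int) (hn : 0 < n) (h : hi - lo ≤ 0) :
    ∀ (xs : List Int) (k : Int), inSum n lo hi xs k = 0 := by
  intro xs
  induction xs with
  | nil => intro k; rfl
  | cons w t ih =>
    intro k
    rw [inSum, ih]
    have hm : 0 ≤ PySem.Int.mod (k - lo) n := by
      rw [PySem.Int.mod_eq_emod_of_pos hn]
      exact Int.emod_nonneg _ (by omega)
    rw [if_neg (by omega)]
    ring

-- the window may be shifted by a multiple of n without changing membership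
lemma inSum_shift (n lo lo' hi hi' : Int) (hn : 0 < n)
    (hm : PySem.Int.mod lo n = PySem.Int.mod lo' n) (hlen : hi - lo = hi' - lo') :
    ∀ (xs : List Int) (k : Int), inSum n lo hi xs k = inSum n lo' hi' xs k := by
  intro xs
  induction xs with
  | nil => intro k; rfl
  | cons w t ih =>
    intro k
    rw [inSum, inSum, ih]
    have hcond : PySem.Int.mod (k - lo) n = PySem.Int.mod (k - lo') n := by
      rw [PySem.Int.mod_eq_emod_of_pos hn, PySem.Int.mod_eq_emod_of_pos hn]
      rw [PySem.Int.mod_eq_emod_of_pos hn, PySem.Int.mod_eq_emod_of_pos hn] at hm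
      rw [Int.sub_emod k lo n, Int.sub_emod k lo' n, hm]
    rw [hcond, hlen]

-- one step of a windowed take/drop sum
lemma inS_cons (lo hi k w : Int) (t : List Int) :
    (((w :: t).take (hi - k).toNat).drop (lo - k).toNat).sum
      = (if lo ≤ k ∧ k < hi then w else 0)
        + ((t.take (hi - (k + 1)).toNat).drop (lo - (k + 1)).toNat).sum := by
  by_cases hhi : k < hi
  · have h1 : (hi - k).toNat = (hi - (k + 1)).toNat + 1 := by omega
    rw [h1, List.take_succ_cons]
    by_cases hlo : lo ≤ k
    · have h2 : (lo - k).toNat = 0 := by omega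
      have h3 : (lo - (k + 1)).toNat = 0 := by omega
      simp [h2, h3, hlo, hhi]
    · have h2 : (lo - k).toNat = (lo - (k + 1)).toNat + 1 := by omega
      rw [h2, List.drop_succ_cons]
      simp [hlo]
  · have h1 : (hi - k).toNat = 0 := by omega
    have h2 : (hi - (k + 1)).toNat = 0 := by omega
    simp [h1, h2, hhi]

-- one step of a prefix take sum
lemma take_cons_sum (e k w : Int) (t : List Int) :
    ((w :: t).take (e - k).toNat).sum
      = (if k < e then w else 0) + (t.take (e - (k + 1)).toNat).sum := by
  by_cases h : k < e
  · have h1 : (e - k).toNat = (e - (k + 1)).toNat + 1 := by omega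
    rw [h1, List.take_succ_cons]
    simp [h]
  · have h1 : (e - k).toNat = 0 := by omega
    have h2 : (e - (k + 1)).toNat = 0 := by omega
    simp [h1, h2, h]

-- closed form for the inside sum of a normalized window [s0, s0+L), L ≤ n
lemma inSum_closed (n s0 L : Int) (hn : 0 < n) (hs0 : 0 ≤ s0 ∧ s0 < n)
    (hL : 0 ≤ L ∧ L ≤ n) :
    ∀ (t : List Int) (k : Int), 0 ≤ k → k + (t.length : Int) ≤ n →
      inSum n s0 (s0 + L) t k
        = ((t.take (s0 + L - k).toNat).drop (s0 - k).toNat).sum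
          + (t.take (s0 + L - n - k).toNat).sum := by
  intro t
  induction t with
  | nil => intro k _ _; simp [inSum]
  | cons w t ih =>
    intro k hk hlen
    have hkn : k < n := by
      simp only [List.length_cons] at hlen
      push_cast at hlen
      omega
    have hlen' : (k + 1) + (t.length : Int) ≤ n := by
      simp only [List.length_cons] at hlen
      push_cast at hlen ⊢
      omega
    rw [inSum, ih (k + 1) (by omega) hlen', inS_cons, take_cons_sum]
    have hmod : PySem.Int.mod (k - s0) n = if s0 ≤ k then k - s0 else k - s0 + n := by
      rw [PySem.Int.mod_eq_emod_of_pos hn]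
      split_ifs with h
      · exact Int.emod_eq_of_lt (by omega) (by omega)
      · have he : (k - s0) % n = (k - s0 + n * 1) % n := (Int.add_mul_emod_self_left ..).symm
        rw [he, Int.emod_eq_of_lt (by omega) (by omega)]
        ring
    rw [hmod]
    have hwin : s0 + L - s0 = L := by ring
    rw [hwin]
    split_ifs <;> omega

theorem distanceBetweenBusStops_spec : Claim_equal_distanceBetweenBusStops := by
  intro distance start destination _hDom hPre
  unfold Spec_distanceBetweenBusStops distanceBetweenBusStops distanceBetweenBusStops_alt
  set n : Int := (distance.length : Int) with hndef
  set s : Int := min start destination with hs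
  set d : Int := max start destination with hd
  have hsd : (if start > destination then (destination, start) else (start, destination)) = (s, d) := by
    split_ifs with h
    · simp [hs, hd]; omega
    · simp [hs, hd]; omega
  have hlohi : (if start ≤ destination then (start, destination) else (destination, start)) = (s, d) := by
    split_ifs with h
    · simp [hs, hd]; omega
    · simp [hs, hd]; omega
  have hsdle : s ≤ d := min_le_max
  simp only [hsd, hlohi]
  rw [pvBLoop_eq]
  simp only [zero_add]
  have hpre' : s = d ∨ (0 < n ∧ -n ≤ s ∧ d ≤ n ∧ d - s ≤ n) := by
    rcases hPre with heq | hb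
    · left; rw [hs, hd, heq]; simp
    · right; exact hb
  rcases Nat.eq_zero_or_pos distance.length with hn0 | hnpos
  · -- empty route: Pre_ forces equal stops; both sides are min 0 0
    have hn0' : n = 0 := by rw [hndef]; exact_mod_cast hn0
    have hsdeq : s = d := by
      rcases hpre' with h | h
      · exact h
      · omega
    have hxs : distance = [] := List.eq_nil_of_length_eq_zero hn0
    have hr1 : PySem.List.pyRange s d 1 = [] := by
      rw [PySem.List.pyRange_one s d, hsdeq]
      simp
    have hr2 : PySem.List.pyRange d (n + s) 1 = [] := by
      rw [PySem.List.pyRange_one d (n + s)]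
      have h : (n + s - d).toNat = 0 := by omega
      rw [h]
      simp
    have hI : inSum n s d distance 0 = 0 := by rw [hxs]; rfl
    have hsum : distance.sum = 0 := by rw [hxs]; rfl
    rw [hr1, hr2, hI, hsum]
    simp
  · have hn : 0 < n := by rw [hndef]; exact_mod_cast hnpos
    have hnz : n ≠ 0 := by omega
    rcases eq_or_lt_of_le hsdle with hsdeq | hslt
    · -- equal stops on a nonempty route: forward arc empty, A's second loop sums the whole route
      rw [← hsdeq]
      have hr1 : PySem.List.pyRange s s 1 = [] := by
        rw [PySem.List.pyRange_one s s]
        simp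
      have hr2 : (PySem.List.pyRange s (n + s) 1).foldl
          (fun acc j => acc + PySem.List.pyGetD distance (PySem.Int.mod j n) 0) 0
          = distance.sum := by
        have h := rem2_full distance s hn
        rw [← hndef] at h
        exact h
      have hI : inSum n s s distance 0 = 0 := inSum_zero n s s hn (by omega) distance 0
      rw [hr1, hr2, hI]
      simp
    · -- s < d, both stops within ±n, span at most n
      obtain ⟨-, hbl, hbr, hspan⟩ : 0 < n ∧ -n ≤ s ∧ d ≤ n ∧ d - s ≤ n := by
        rcases hpre' with h | h
        · omega
        · exact h
      set s0 : Int := PySem.Int.mod s n with hs0def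
      have hs0 : 0 ≤ s0 ∧ s0 < n := by
        rw [hs0def, PySem.Int.mod_eq_emod_of_pos hn]
        exact ⟨Int.emod_nonneg s hnz, Int.emod_lt_of_pos s hn⟩
      set d0 : Int := PySem.Int.mod d n with hd0def
      have hd0 : 0 ≤ d0 ∧ d0 < n := by
        rw [hd0def, PySem.Int.mod_eq_emod_of_pos hn]
        exact ⟨Int.emod_nonneg d hnz, Int.emod_lt_of_pos d hn⟩
      have hd0eq : d0 = (if s0 + (d - s) < n then s0 + (d - s) else s0 + (d - s) - n) := by
        have hds : d = (s0 + (d - s)) + n * PySem.Int.floordiv s n := by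
          have hq := PySem.Int.floordiv_mul_add_mod s n
          rw [hs0def]; linarith [hq]
        rw [hd0def, PySem.Int.mod_eq_emod_of_pos hn]
        conv_lhs => rw [hds]
        rw [Int.add_mul_emod_self_left]
        split_ifs with hlt
        · exact Int.emod_eq_of_lt (by omega) (by omega)
        · have : (s0 + (d - s)) % n = ((s0 + (d - s) - n) + n * 1) % n := by ring_nf
          rw [this, Int.add_mul_emod_self_left, Int.emod_eq_of_lt (by omega) (by omega)]
      -- A's forward arc, in slice form
      have hrem1 : (PySem.List.pyRange s d 1).foldl (fun acc i => acc + PySem.List.pyGetD distance i 0) 0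
          = (PySem.List.slice distance (some s0) (some (s0 + (d - s)))).sum
            + (distance.take (s0 + (d - s) - n).toNat).sum := by
        rw [PySem.List.foldl_add]
        have hcg : (PySem.List.pyRange s d 1).map (fun i => PySem.List.pyGetD distance i 0)
            = (PySem.List.pyRange s d 1).map
                (fun i => PySem.List.pyGetD distance (PySem.Int.mod i n) 0) := by
          apply List.map_congr_left
          intro i hi
          rw [PySem.List.mem_pyRange_one] at hi
          exact pyGetD_eq_mod distance i hn (by omega) (by omega)
        have hdrw : d = s + (d - s) := by ring
        rw [hcg]
        conv_lhs => rw [hdrw]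
        rw [arc_sum distance s (d - s) hn (by omega) hspan]
        rw [← hs0def, ← hndef]
        ring
      -- A's backward arc, in slice form
      have hrem2 : (PySem.List.pyRange d (n + s) 1).foldl
          (fun acc j => acc + PySem.List.pyGetD distance (PySem.Int.mod j n) 0) 0
          = (PySem.List.slice distance (some d0) (some (d0 + (n + s - d)))).sum
            + (distance.take (d0 + (n + s - d) - n).toNat).sum := by
        rw [PySem.List.foldl_add]
        have hdrw : n + s = d + (n + s - d) := by ring
        conv_lhs => rw [hdrw]
        rw [arc_sum distance d (n + s - d) hn (by omega) (by omega)]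
        rw [← hd0def, ← hndef]
        ring
      -- B's inside sum equals A's forward arc
      have hshiftB : inSum n s d distance 0 = inSum n s0 (s0 + (d - s)) distance 0 := by
        apply inSum_shift n s s0 d (s0 + (d - s)) hn _ (by ring)
        rw [← hs0def]
        have : PySem.Int.mod s0 n = s0 := by
          rw [PySem.Int.mod_eq_emod_of_pos hn]
          exact Int.emod_eq_of_lt hs0.1 hs0.2
        rw [this]
      have hclosed := inSum_closed n s0 (d - s) hn hs0 ⟨by omega, hspan⟩ distance 0
        le_rfl (by omega)
      have hBeq : inSum n s d distance 0
          = (PySem.List.slice distance (some s0) (some (s0 + (d - s)))).sum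
            + (distance.take (s0 + (d - s) - n).toNat).sum := by
        rw [hshiftB, hclosed]
        simp only [sub_zero]
        rw [PySem.List.slice_toNat distance hs0.1 (by omega),
          sum_take_sub distance s0.toNat (s0 + (d - s)).toNat (by omega),
          sum_take_drop distance s0.toNat (s0 + (d - s)).toNat (by omega)]
      -- the backward arc is the complement of the forward arc
      have key : (PySem.List.slice distance (some d0) (some (d0 + (n + s - d)))).sum
            + (distance.take (d0 + (n + s - d) - n).toNat).sum
          = distance.sum
            - ((PySem.List.slice distance (some s0) (some (s0 + (d - s)))).sum
                + (distance.take (s0 + (d - s) - n).toNat).sum) := by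
        rw [PySem.List.slice_toNat distance hd0.1 (by omega),
          PySem.List.slice_toNat distance hs0.1 (by omega)]
        by_cases hcase : s0 + (d - s) < n
        · have hd0v : d0 = s0 + (d - s) := by rw [hd0eq]; simp [hcase]
          have hf : ((distance.drop s0.toNat).take ((s0 + (d - s)).toNat - s0.toNat)).sum
              = (distance.take (s0 + (d - s)).toNat).sum - (distance.take s0.toNat).sum :=
            sum_take_sub distance s0.toNat (s0 + (d - s)).toNat (by omega)
          have ht1 : (distance.take (s0 + (d - s) - n).toNat).sum = 0 := by
            have : (s0 + (d - s) - n).toNat = 0 := by omega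
            rw [this]; simp
          have hb1 : (distance.drop d0.toNat).take ((d0 + (n + s - d)).toNat - d0.toNat)
              = distance.drop d0.toNat := by
            apply List.take_of_length_le
            simp only [List.length_drop]
            omega
          have hb1s : (distance.drop d0.toNat).sum
              = distance.sum - (distance.take d0.toNat).sum := sum_drop_eq distance d0.toNat
          have hb2 : (distance.take (d0 + (n + s - d) - n).toNat).sum
              = (distance.take s0.toNat).sum := by
            congr 2
            omega
          rw [hf, ht1, hb1, hb1s, hb2, hd0v]
          ring
        · have hd0v : d0 = s0 + (d - s) - n := by rw [hd0eq]; simp [hcase]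
          have hf1 : (distance.drop s0.toNat).take ((s0 + (d - s)).toNat - s0.toNat)
              = distance.drop s0.toNat := by
            apply List.take_of_length_le
            simp only [List.length_drop]
            omega
          have hf1s : (distance.drop s0.toNat).sum
              = distance.sum - (distance.take s0.toNat).sum := sum_drop_eq distance s0.toNat
          have hf2 : (distance.take (s0 + (d - s) - n).toNat).sum
              = (distance.take d0.toNat).sum := by
            congr 2
            omega
          have hb : ((distance.drop d0.toNat).take ((d0 + (n + s - d)).toNat - d0.toNat)).sum
              = (distance.take s0.toNat).sum - (distance.take d0.toNat).sum := by
            have h1 : (d0 + (n + s - d)).toNat = s0.toNat := by omega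
            rw [h1]
            exact sum_take_sub distance d0.toNat s0.toNat (by omega)
          have ht2 : (distance.take (d0 + (n + s - d) - n).toNat).sum = 0 := by
            have : (d0 + (n + s - d) - n).toNat = 0 := by omega
            rw [this]; simp
          rw [hf1, hf1s, hf2, hb, ht2]
          ring
      rw [hrem1, hrem2, hBeq, key]
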